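-- pv_equiv track=rewrite | github.com/KooshaPari/Tracera | .archive/p1-test-fixes-2026-04-27-merged-ghost/scripts/backfill_live_ledger.py | extract_acceptance
-- ===== SOURCE A (Python) =====
-- def extract_acceptance(text: str) -> str:
--     lines: list[str] = []
--     capture = False
--     for line in text.splitlines():
--         stripped = line.strip()
--         if stripped.startswith("**Goal**:"):
--             return stripped.replace("**Goal**:", "", 1).strip()
--         if stripped.startswith("**Independent Test**:"):
--             return stripped.replace("**Independent Test**:", "", 1).strip()
--         if stripped == "### Acceptance Scenarios":
--             capture = True
--             continue
--         if capture:
--             if stripped.startswith("### ") or stripped.startswith("## "):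
--                 break
--             if stripped:
--                 lines.append(stripped)
--     return " ".join(lines[:3]).strip()
-- ===== SOURCE B (Python) =====
-- def extract_acceptance(text: str) -> str:
--     H = "### Acceptance Scenarios"
--     stripped = [line.strip() for line in text.splitlines()]
--     n = len(stripped)
--     # bounds of the acceptance section: heading index h, terminator index t
--     h = next((i for i, s in enumerate(stripped) if s == H), n)
--     t = next((i for i in range(h + 1, n)
--               if stripped[i] != H
--               and (stripped[i].startswith("### ") or stripped[i].startswith("## "))), n)
--     # phase 1: a Goal / Independent Test line anywhere before the terminator wins
--     for s in stripped[:t]: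
--         if s.startswith("**Goal**:"):
--             return s[len("**Goal**:"):].strip()
--         if s.startswith("**Independent Test**:"):
--             return s[len("**Independent Test**:"):].strip()
--     # phase 2: first three non-empty lines of the acceptance section
--     body = [s for s in stripped[h + 1:t] if s and s != H]
--     return " ".join(body[:3]).strip()
-- ===== Notes on version B (the rewrite author's own statement) =====
-- stated objective: alternative
-- what changed: Replaced A's single-pass capture-flag state machine with a two-phase decomposition: first compute the acceptance-section bounds (heading index h, terminator index t), then scan the pre-terminator prefix for a Goal/Independent-Test line, and only if none exists build the section body by a comprehension over the slice stripped[h+1:t].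
import Mathlib
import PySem

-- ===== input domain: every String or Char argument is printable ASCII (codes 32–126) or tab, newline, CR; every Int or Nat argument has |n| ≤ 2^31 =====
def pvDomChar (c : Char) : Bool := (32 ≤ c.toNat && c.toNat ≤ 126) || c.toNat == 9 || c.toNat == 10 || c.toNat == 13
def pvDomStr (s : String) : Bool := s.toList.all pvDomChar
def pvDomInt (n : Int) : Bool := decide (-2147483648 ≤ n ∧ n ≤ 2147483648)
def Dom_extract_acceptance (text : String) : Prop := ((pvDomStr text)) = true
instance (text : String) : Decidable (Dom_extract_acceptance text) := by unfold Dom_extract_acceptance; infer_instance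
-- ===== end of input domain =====

-- B: two-phase decomposition (compute section bounds h/t first, then a Goal/Independent-Test scan over the prefix, then a comprehension over the section slice) instead of A's one-pass capture-flag state machine; objective: alternative, same cost.


def pvG : String := "**Goal**:"
def pvI : String := "**Independent Test**:"
def pvH : String := "### Acceptance Scenarios"

-- ===== PORT A =====
-- str.replace(old, new, 1): replace the FIRST occurrence only (PySem has only replace-all);
-- hand port via find, exact for old ≠ "" (both call sites use a non-empty literal old).
def pyReplace1 (s old new : String) : String :=
  let i := PySem.Str.find s old
  if i < 0 then s
  else String.mk (s.toList.take i.toNat ++ new.toList ++ s.toList.drop (i.toNat + old.toList.length))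

def extract_acceptance.go : List String → Bool → List String → String
  | [], _, acc => PySem.Str.strip (PySem.Str.join " " (acc.take 3))
  | line :: rest, capture, acc =>
    let s := PySem.Str.strip line
    if PySem.Str.startswith s pvG then PySem.Str.strip (pyReplace1 s pvG "")
    else if PySem.Str.startswith s pvI then PySem.Str.strip (pyReplace1 s pvI "")
    else if s == pvH then extract_acceptance.go rest true acc
    else if capture then
      (if PySem.Str.startswith s "### " || PySem.Str.startswith s "## " then
        PySem.Str.strip (PySem.Str.join " " (acc.take 3))   -- break, then the final join
      else if s != "" then extract_acceptance.go rest capture (acc ++ [s])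
      else extract_acceptance.go rest capture acc)
    else extract_acceptance.go rest capture acc

def extract_acceptance (text : String) : String :=
  extract_acceptance.go (PySem.Str.splitlines text) false []

-- ===== PORT B =====
def pvTerm (s : String) : Bool := s != pvH && (PySem.Str.startswith s "### " || PySem.Str.startswith s "## ")

-- phase 1 of Source B: first Goal / Independent Test line wins (s[len(p):] ported as toList.drop)
def phase1B : List String → Option String
  | [] => none
  | s :: rest =>
    if PySem.Str.startswith s pvG then some (PySem.Str.strip (String.mk (s.toList.drop pvG.toList.length)))
    else if PySem.Str.startswith s pvI then some (PySem.Str.strip (String.mk (s.toList.drop pvI.toList.length)))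
    else phase1B rest

def extract_acceptance_alt (text : String) : String :=
  let stripped := (PySem.Str.splitlines text).map PySem.Str.strip
  let n := stripped.length
  let h := (stripped.findIdx? (· == pvH)).getD n
  let t := match (stripped.drop (h+1)).findIdx? pvTerm with
           | some j => h + 1 + j
           | none => n
  match phase1B (stripped.take t) with
  | some r => r
  | none =>
    let body := ((stripped.drop (h+1)).take (t - (h+1))).filter (fun s => s != "" && s != pvH)
    PySem.Str.strip (PySem.Str.join " " (body.take 3))

-- ===== PRECONDITION & SPEC =====
def Spec_extract_acceptance (text : String) (out : String) : Prop := out = extract_acceptance_alt text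
instance (text : String) (out : String) : Decidable (Spec_extract_acceptance text out) := by unfold Spec_extract_acceptance; infer_instance

-- ===== CLAIM (what is proved, stated in full; the proofs are below) =====
def Claim_equal_extract_acceptance : Prop := ∀ (text : String), Dom_extract_acceptance text → Spec_extract_acceptance text (extract_acceptance text)

-- ===== LEMMAS AND PROOFS =====

-- go without the per-line strip, run on a pre-stripped list
def goS : List String → Bool → List String → String
  | [], _, acc => PySem.Str.strip (PySem.Str.join " " (acc.take 3))
  | s :: rest, capture, acc =>
    if PySem.Str.startswith s pvG then PySem.Str.strip (pyReplace1 s pvG "")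
    else if PySem.Str.startswith s pvI then PySem.Str.strip (pyReplace1 s pvI "")
    else if s == pvH then goS rest true acc
    else if capture then
      (if PySem.Str.startswith s "### " || PySem.Str.startswith s "## " then
        PySem.Str.strip (PySem.Str.join " " (acc.take 3))
      else if s != "" then goS rest capture (acc ++ [s])
      else goS rest capture acc)
    else goS rest capture acc

lemma go_eq_goS : ∀ (ls : List String) (cap : Bool) (acc : List String),
    extract_acceptance.go ls cap acc = goS (ls.map PySem.Str.strip) cap acc := by
  intro ls
  induction ls with
  | nil => intro cap acc; rfl
  | cons l rest ih =>
    intro cap acc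
    simp only [extract_acceptance.go, goS, List.map]
    split_ifs <;> simp [ih]

-- clash of incompatible prefixes
lemma prefix_clash {p q l : List Char} (h1 : ¬ p <+: q) (h2 : ¬ q <+: p)
    (hp : p <+: l) : ¬ q <+: l := by
  intro hq
  rcases List.prefix_or_prefix_of_prefix hp hq with h | h
  · exact h1 h
  · exact h2 h

lemma sw_iff (s p : String) : PySem.Str.startswith s p = true ↔ p.toList <+: s.toList := by
  simp [PySem.Chars.startswith_iff]

-- a Goal/IndepTest-prefixed line is not pvH and not a terminator
lemma goalish_props {s p : String} (h : p.toList <+: s.toList)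
    (hG : p = pvG ∨ p = pvI) : (s == pvH) = false ∧ pvTerm s = false := by
  have h3 : ¬ ("### ".toList <+: s.toList) := by
    apply prefix_clash (p := p.toList) _ _ h
    · rcases hG with rfl | rfl <;> decide
    · rcases hG with rfl | rfl <;> decide
  have h2 : ¬ ("## ".toList <+: s.toList) := by
    apply prefix_clash (p := p.toList) _ _ h
    · rcases hG with rfl | rfl <;> decide
    · rcases hG with rfl | rfl <;> decide
  have hne : (s == pvH) = false := by
    rcases hG with rfl | rfl <;>
    · apply beq_eq_false_iff_ne.mpr
      rintro rfl
      revert h; decide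
  refine ⟨hne, ?_⟩
  simp only [pvTerm, bne, hne, Bool.not_false, Bool.true_and]
  have e3 : PySem.Str.startswith s "### " = false := by
    cases hb : PySem.Str.startswith s "### "
    · rfl
    · exact absurd ((sw_iff s "### ").mp hb) h3
  have e2 : PySem.Str.startswith s "## " = false := by
    cases hb : PySem.Str.startswith s "## "
    · rfl
    · exact absurd ((sw_iff s "## ").mp hb) h2
  rw [e3, e2]; rfl

-- replace(old, "", 1) on a string starting with old is just dropping the prefix
lemma replace1_prefix {s p : String} (hp : p.toList <+: s.toList) :
    pyReplace1 s p "" = String.mk (s.toList.drop p.toList.length) := by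
  have hinf : p.toList <:+: s.toList := hp.isInfix
  have hfind : PySem.Chars.find s.toList p.toList = 0 := by
    have hnn : 0 ≤ PySem.Chars.find s.toList p.toList :=
      (PySem.Chars.find_nonneg_iff _ _).mpr hinf
    have hspec := PySem.Chars.find_spec (s := s.toList) (sub := p.toList) hnn
    by_contra hne0
    have hpos : 0 < (PySem.Chars.find s.toList p.toList).toNat := by omega
    exact (hspec.2 0 hpos) (by simpa using hp)
  simp [pyReplace1, hfind]

-- abbreviations for the proof
def pvFin (acc : List String) : String := PySem.Str.strip (PySem.Str.join " " (acc.take 3))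
def pvBody (ls : List String) : List String := ls.filter (fun s => s != "" && s != pvH)
def pvT (ls : List String) : Nat := (ls.findIdx? pvTerm).getD ls.length
def capR (ls acc : List String) : String :=
  match phase1B (ls.take (pvT ls)) with
  | some r => r
  | none => pvFin (acc ++ pvBody (ls.take (pvT ls)))
def pvHd (ls : List String) : Nat := (ls.findIdx? (· == pvH)).getD ls.length
def pvTF (ls : List String) : Nat :=
  match (ls.drop (pvHd ls + 1)).findIdx? pvTerm with
  | some j => pvHd ls + 1 + j
  | none => ls.length
def fullR (ls acc : List String) : String :=
  match phase1B (ls.take (pvTF ls)) with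
  | some r => r
  | none => pvFin (acc ++ pvBody ((ls.drop (pvHd ls + 1)).take (pvTF ls - (pvHd ls + 1))))

lemma pvT_cons_false {s : String} {rest : List String} (h : pvTerm s = false) :
    pvT (s :: rest) = pvT rest + 1 := by
  simp only [pvT, List.findIdx?_cons, h]
  cases hf : rest.findIdx? pvTerm <;> simp [hf, List.length_cons]

lemma pvT_cons_true {s : String} {rest : List String} (h : pvTerm s = true) :
    pvT (s :: rest) = 0 := by
  simp [pvT, List.findIdx?_cons, h]

lemma pvHd_cons_ne {s : String} {rest : List String} (h : (s == pvH) = false) :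
    pvHd (s :: rest) = pvHd rest + 1 := by
  simp only [pvHd, List.findIdx?_cons]
  simp only [h, if_false]
  cases hf : rest.findIdx? (· == pvH) <;> simp [hf, List.length_cons]

lemma pvTF_cons_ne {s : String} {rest : List String} (h : (s == pvH) = false) :
    pvTF (s :: rest) = pvTF rest + 1 := by
  simp only [pvTF, pvHd_cons_ne h, List.drop_succ_cons]
  cases hf : (rest.drop (pvHd rest + 1)).findIdx? pvTerm <;> simp [hf, List.length_cons] <;> omega

lemma pvTF_cons_H {s : String} {rest : List String} (h : (s == pvH) = true) :
    pvTF (s :: rest) = pvT rest + 1 := by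
  have h0 : pvHd (s :: rest) = 0 := by simp [pvHd, List.findIdx?_cons, h]
  simp only [pvTF, h0, Nat.zero_add, List.drop_succ_cons, List.drop_zero, pvT]
  cases hf : rest.findIdx? pvTerm <;> simp [hf, List.length_cons] <;> omega

-- phase1B step facts
lemma phase1B_cons_skip {s : String} {rest : List String}
    (hG : PySem.Str.startswith s pvG = false) (hI : PySem.Str.startswith s pvI = false) :
    phase1B (s :: rest) = phase1B rest := by
  have hG2 : PySem.Chars.startswith s.toList pvG.toList = false := by simpa using hG
  have hI2 : PySem.Chars.startswith s.toList pvI.toList = false := by simpa using hI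
  simp [phase1B, hG2, hI2]

-- capture-phase characterisation: goS in capture mode equals B's phases over the pre-terminator prefix
lemma goS_capture : ∀ (ls acc : List String), goS ls true acc = capR ls acc := by
  intro ls
  induction ls with
  | nil =>
    intro acc
    simp [goS, capR, pvT, phase1B, pvFin, pvBody]
  | cons s rest ih =>
    intro acc
    by_cases hG : PySem.Str.startswith s pvG = true
    · have hGc : PySem.Chars.startswith s.toList pvG.toList = true := by simpa using hG
      have hp := goalish_props ((sw_iff s pvG).mp hG) (Or.inl rfl)
      have ht := pvT_cons_false (rest := rest) hp.2
      have hL : goS (s :: rest) true acc = PySem.Str.strip (pyReplace1 s pvG "") := by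
        simp [goS, hGc]
      rw [hL, capR, ht, List.take_succ_cons]
      have hR : phase1B (s :: rest.take (pvT rest)) =
          some (PySem.Str.strip (String.mk (s.toList.drop pvG.toList.length))) := by
        simp [phase1B, hGc]
      rw [hR, replace1_prefix ((sw_iff s pvG).mp hG)]
    · have hGc : PySem.Chars.startswith s.toList pvG.toList = false := by simpa using hG
      by_cases hI : PySem.Str.startswith s pvI = true
      · have hIc : PySem.Chars.startswith s.toList pvI.toList = true := by simpa using hI
        have hp := goalish_props ((sw_iff s pvI).mp hI) (Or.inr rfl)
        have ht := pvT_cons_false (rest := rest) hp.2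
        have hL : goS (s :: rest) true acc = PySem.Str.strip (pyReplace1 s pvI "") := by
          simp [goS, hGc, hIc]
        rw [hL, capR, ht, List.take_succ_cons]
        have hR : phase1B (s :: rest.take (pvT rest)) =
            some (PySem.Str.strip (String.mk (s.toList.drop pvI.toList.length))) := by
          simp [phase1B, hGc, hIc]
        rw [hR, replace1_prefix ((sw_iff s pvI).mp hI)]
      · have hIc : PySem.Chars.startswith s.toList pvI.toList = false := by simpa using hI
        have hG' : PySem.Str.startswith s pvG = false := by simpa using hG
        have hI' : PySem.Str.startswith s pvI = false := by simpa using hI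
        by_cases hH : s = pvH
        · have hterm : pvTerm s = false := by simp [pvTerm, bne, hH]
          have hL : goS (s :: rest) true acc = goS rest true acc := by
            simp only [goS, hH]
            rw [if_neg (by decide), if_neg (by decide), if_pos (by decide)]
          rw [hL, ih acc, capR, capR, pvT_cons_false hterm, List.take_succ_cons,
              phase1B_cons_skip hG' hI']
          have hb : pvBody (s :: rest.take (pvT rest)) = pvBody (rest.take (pvT rest)) := by
            simp [pvBody, hH]
          rw [hb]
        · by_cases hterm : pvTerm s = true
          · have hsw : (PySem.Str.startswith s "### " || PySem.Str.startswith s "## ") = true := by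
              simp only [pvTerm] at hterm
              exact (Bool.and_eq_true_iff.mp hterm).2
            have hsw3 := Bool.or_eq_true_iff.mp hsw
            have hL : goS (s :: rest) true acc =
                PySem.Str.strip (PySem.Str.join " " (acc.take 3)) := by
              rcases hsw3 with h3 | h2
              · have h3c : PySem.Chars.startswith s.toList ['#', '#', '#', ' '] = true := by
                  simpa using h3
                simp [goS, hGc, hIc, hH, h3c]
              · have h2c : PySem.Chars.startswith s.toList ['#', '#', ' '] = true := by
                  simpa using h2
                simp [goS, hGc, hIc, hH, h2c]
            rw [hL, capR, pvT_cons_true hterm, List.take_zero]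
            simp [phase1B, pvBody, pvFin]
          · have hterm' : pvTerm s = false := by simpa using hterm
            have hswb : (PySem.Str.startswith s "### " || PySem.Str.startswith s "## ") = false := by
              have hbne : (s != pvH) = true := by simp [bne, hH]
              simp only [pvTerm, hbne, Bool.true_and] at hterm'
              exact hterm'
            have h3c : PySem.Chars.startswith s.toList ['#', '#', '#', ' '] = false := by
              simpa using (Bool.or_eq_false_iff.mp hswb).1
            have h2c : PySem.Chars.startswith s.toList ['#', '#', ' '] = false := by
              simpa using (Bool.or_eq_false_iff.mp hswb).2
            by_cases hE : s = ""
            · have hL : goS (s :: rest) true acc = goS rest true acc := by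
                subst hE; rfl
              rw [hL, ih acc, capR, capR, pvT_cons_false hterm', List.take_succ_cons,
                  phase1B_cons_skip hG' hI']
              have hb : pvBody (s :: rest.take (pvT rest)) = pvBody (rest.take (pvT rest)) := by
                simp [pvBody, List.filter_cons, hE]
              rw [hb]
            · have hL : goS (s :: rest) true acc = goS rest true (acc ++ [s]) := by
                simp [goS, hGc, hIc, hH, h3c, h2c, hE]
              rw [hL, ih (acc ++ [s]), capR, capR, pvT_cons_false hterm', List.take_succ_cons,
                  phase1B_cons_skip hG' hI']
              have hb : pvBody (s :: rest.take (pvT rest)) = s :: pvBody (rest.take (pvT rest)) := by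
                simp [pvBody, List.filter_cons, hE, hH]
              rw [hb]
              cases phase1B (rest.take (pvT rest)) with
              | some r => rfl
              | none => simp [pvFin, List.append_assoc]

-- full characterisation from the initial (pre-capture) state
lemma goS_full : ∀ (ls acc : List String), goS ls false acc = fullR ls acc := by
  intro ls
  induction ls with
  | nil =>
    intro acc
    simp [goS, fullR, pvTF, pvHd, phase1B, pvFin, pvBody]
  | cons s rest ih =>
    intro acc
    by_cases hG : PySem.Str.startswith s pvG = true
    · have hGc : PySem.Chars.startswith s.toList pvG.toList = true := by simpa using hG
      have hp := goalish_props ((sw_iff s pvG).mp hG) (Or.inl rfl)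
      have hL : goS (s :: rest) false acc = PySem.Str.strip (pyReplace1 s pvG "") := by
        simp [goS, hGc]
      rw [hL, fullR, pvTF_cons_ne hp.1, List.take_succ_cons]
      have hR : phase1B (s :: rest.take (pvTF rest)) =
          some (PySem.Str.strip (String.mk (s.toList.drop pvG.toList.length))) := by
        simp [phase1B, hGc]
      rw [hR, replace1_prefix ((sw_iff s pvG).mp hG)]
    · have hGc : PySem.Chars.startswith s.toList pvG.toList = false := by simpa using hG
      by_cases hI : PySem.Str.startswith s pvI = true
      · have hIc : PySem.Chars.startswith s.toList pvI.toList = true := by simpa using hI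
        have hp := goalish_props ((sw_iff s pvI).mp hI) (Or.inr rfl)
        have hL : goS (s :: rest) false acc = PySem.Str.strip (pyReplace1 s pvI "") := by
          simp [goS, hGc, hIc]
        rw [hL, fullR, pvTF_cons_ne hp.1, List.take_succ_cons]
        have hR : phase1B (s :: rest.take (pvTF rest)) =
            some (PySem.Str.strip (String.mk (s.toList.drop pvI.toList.length))) := by
          simp [phase1B, hGc, hIc]
        rw [hR, replace1_prefix ((sw_iff s pvI).mp hI)]
      · have hIc : PySem.Chars.startswith s.toList pvI.toList = false := by simpa using hI
        have hG' : PySem.Str.startswith s pvG = false := by simpa using hG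
        have hI' : PySem.Str.startswith s pvI = false := by simpa using hI
        by_cases hH : s = pvH
        · -- heading: switch to capture mode
          have hHb : (s == pvH) = true := by simp [hH]
          have hL : goS (s :: rest) false acc = goS rest true acc := by
            simp only [goS, hH]
            rw [if_neg (by decide), if_neg (by decide), if_pos (by decide)]
          have h0 : pvHd (s :: rest) = 0 := by simp [pvHd, List.findIdx?_cons, hHb]
          rw [hL, goS_capture rest acc, capR, fullR, pvTF_cons_H hHb, h0,
              List.take_succ_cons, phase1B_cons_skip hG' hI']
          simp only [Nat.zero_add, List.drop_succ_cons, List.drop_zero, Nat.add_sub_cancel]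
        · have hHb : (s == pvH) = false := by simp [hH]
          have hL : goS (s :: rest) false acc = goS rest false acc := by
            simp [goS, hGc, hIc, hH]
          rw [hL, ih acc, fullR, fullR, pvTF_cons_ne hHb, List.take_succ_cons,
              phase1B_cons_skip hG' hI', pvHd_cons_ne hHb]
          have hd : (s :: rest).drop (pvHd rest + 1 + 1) = rest.drop (pvHd rest + 1) :=
            List.drop_succ_cons ..
          have hsub : pvTF rest + 1 - (pvHd rest + 1 + 1) = pvTF rest - (pvHd rest + 1) := by
            omega
          rw [hd, hsub]

lemma alt_eq_fullR (text : String) :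
    extract_acceptance_alt text = fullR ((PySem.Str.splitlines text).map PySem.Str.strip) [] := by
  unfold extract_acceptance_alt fullR pvTF pvHd pvFin pvBody
  rfl

-- ===== VERDICT (by name: the statement is the Claim_ definition above) =====
theorem extract_acceptance_spec : Claim_equal_extract_acceptance := by
  intro text _
  unfold Spec_extract_acceptance
  rw [extract_acceptance, go_eq_goS, goS_full, alt_eq_fullR]
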